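-- pv_equiv track=rewrite | github.com/Aleksey-Danchin/Daito | 1 вариант/15/main.py | F
-- ===== SOURCE A (Python) =====
-- B = [10, 15]
--
-- C = [20, 27]
--
-- def F(A):
--     for x in range(50, 300):
--         x = x // 10
--
--         b = B[0] <= x and x <= B[1]
--         c = C[0] <= x and x <= C[1]
--         a = A[0] <= x and x <= A[1]
--
--         q1 = bool(b + c)
--         q2 = q1 <= a
--         q3 = not q2
--
--         if q3:
--             return False
--
--     return True
-- ===== SOURCE B (Python) =====
-- def F(A):
--     return A[0] <= 10 and A[1] >= 27
-- ===== Notes on version B (the rewrite author's own statement) =====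
-- stated objective: simpler
-- what changed: Replaces the 250-iteration scan over range(50,300) with the closed-form test that the interval [A[0],A[1]] covers the extreme points 10 and 27 of the fixed union [10,15]∪[20,27], keeping the short-circuit order so A[1] is only read when A[0] <= 10.
import Mathlib
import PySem

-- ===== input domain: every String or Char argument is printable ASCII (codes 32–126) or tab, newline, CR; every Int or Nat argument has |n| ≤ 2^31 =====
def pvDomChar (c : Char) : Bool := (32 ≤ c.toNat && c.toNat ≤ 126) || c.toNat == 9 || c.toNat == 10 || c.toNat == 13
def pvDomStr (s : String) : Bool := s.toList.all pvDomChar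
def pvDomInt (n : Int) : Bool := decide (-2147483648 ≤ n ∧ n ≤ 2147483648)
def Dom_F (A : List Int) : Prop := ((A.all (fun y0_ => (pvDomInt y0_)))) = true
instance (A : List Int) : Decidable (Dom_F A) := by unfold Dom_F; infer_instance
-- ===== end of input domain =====

-- ===== PORT A =====
-- loop body of A over the remaining range values; a0/a1 are A[0]/A[1] (getD-defaulted,
-- only read inside Pre_F, where they exist whenever the Python reads them)
def Floop (a0 a1 : Int) : List Int → Bool
  | [] => true
  | x0 :: rest =>
    let x := PySem.Int.floordiv x0 10
    let b := decide (10 ≤ x) && decide (x ≤ 15)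
    let c := decide (20 ≤ x) && decide (x ≤ 27)
    let a := decide (a0 ≤ x) && decide (x ≤ a1)
    let q1 := b || c              -- bool(b + c)
    let q2 := !q1 || a            -- q1 <= a on bools
    let q3 := !q2
    if q3 then false else Floop a0 a1 rest

def F (A : List Int) : Bool :=
  Floop ((PySem.List.pyGet? A 0).getD 0) ((PySem.List.pyGet? A 1).getD 0)
    (PySem.List.pyRange 50 300 1)

-- ===== PORT B =====
-- B: closed form, `A[0] <= 10 and A[1] >= 27` (short-circuit: A[1] read only if A[0] <= 10)
def F_alt (A : List Int) : Bool :=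
  if (PySem.List.pyGet? A 0).getD 0 ≤ 10 then
    decide (27 ≤ (PySem.List.pyGet? A 1).getD 0)
  else false

-- ===== PRECONDITION & SPEC =====
-- Pre_F excludes exactly the inputs on which Python A raises IndexError: the empty list
-- (A[0]), and a one-element list with A[0] <= 10 (A[1] is then read at some x ≤ 10).
def Pre_F (A : List Int) : Prop :=
  A ≠ [] ∧ ((PySem.List.pyGet? A 0).getD 0 ≤ 10 → 2 ≤ A.length)
instance (A : List Int) : Decidable (Pre_F A) := by unfold Pre_F; infer_instance
def pvWitness_F : List Int := [8, 30]

def Spec_F (A : List Int) (out : Bool) : Prop := out = F_alt A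
instance (A : List Int) (out : Bool) : Decidable (Spec_F A out) := by unfold Spec_F; infer_instance

-- ===== CLAIM (what is proved, stated in full; the proofs are below) =====
def Claim_equal_F : Prop := ∀ (A : List Int), Dom_F A → Pre_F A → Spec_F A (F A)

-- ===== LEMMAS AND PROOFS =====

def Fbody (a0 a1 x0 : Int) : Bool :=
  let x := PySem.Int.floordiv x0 10
  !((decide (10 ≤ x) && decide (x ≤ 15)) || (decide (20 ≤ x) && decide (x ≤ 27)))
    || (decide (a0 ≤ x) && decide (x ≤ a1))

theorem Floop_eq_all (a0 a1 : Int) (xs : List Int) :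
    Floop a0 a1 xs = xs.all (Fbody a0 a1) := by
  induction xs with
  | nil => rfl
  | cons x0 rest ih =>
    simp only [Floop, List.all_cons, Fbody, ih]
    cases h : (!((decide (10 ≤ PySem.Int.floordiv x0 10) && decide (PySem.Int.floordiv x0 10 ≤ 15)) ||
        (decide (20 ≤ PySem.Int.floordiv x0 10) && decide (PySem.Int.floordiv x0 10 ≤ 27))) ||
        (decide (a0 ≤ PySem.Int.floordiv x0 10) && decide (PySem.Int.floordiv x0 10 ≤ a1))) <;>
      simp_all

theorem key (a0 a1 : Int) :
    ((PySem.List.pyRange 50 300 1).all (Fbody a0 a1)) =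
      (decide (a0 ≤ 10) && decide (27 ≤ a1)) := by
  by_cases h : a0 ≤ 10 ∧ 27 ≤ a1
  · simp only [h.1, h.2, decide_true, Bool.and_self]
    rw [List.all_eq_true]
    intro x0 hx
    rw [PySem.List.mem_pyRange_one] at hx
    simp only [Fbody, PySem.Int.floordiv_eq_ediv_of_pos (by norm_num : (0:Int) < 10)]
    have h1 := h.1; have h2 := h.2
    simp only [Bool.or_eq_true, Bool.not_eq_true', Bool.and_eq_true, decide_eq_true_eq,
      Bool.or_eq_false_iff, Bool.and_eq_false_iff, decide_eq_false_iff_not]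
    omega
  · have hf : ¬ ((PySem.List.pyRange 50 300 1).all (Fbody a0 a1) = true) := by
      intro hall
      rw [List.all_eq_true] at hall
      have h100 := hall 100 (by rw [PySem.List.mem_pyRange_one]; omega)
      have h270 := hall 270 (by rw [PySem.List.mem_pyRange_one]; omega)
      simp only [Fbody, PySem.Int.floordiv_eq_ediv_of_pos (by norm_num : (0:Int) < 10)] at h100 h270
      norm_num at h100 h270
      exact h ⟨h100.1, h270.2⟩
    rw [Bool.not_eq_true] at hf
    rw [hf]
    have : ¬ (a0 ≤ 10 ∧ 27 ≤ a1) := h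
    by_cases h0 : a0 ≤ 10 <;> simp_all

-- ===== VERDICT (by name: the statement is the Claim_ definition above) =====
theorem F_spec : Claim_equal_F := by
  intro A _ _
  unfold Spec_F F F_alt
  rw [Floop_eq_all, key]
  by_cases h0 : (PySem.List.pyGet? A 0).getD 0 ≤ 10 <;> simp [h0]
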